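-- pv_equiv track=rewrite | github.com/bheinzerling/dougu | dougu/iters.py | unordered_pairs
-- ===== SOURCE A (Python) =====
-- def unordered_pairs(iterable):
--     """Yield all unordered pairs of items in iterable.
--
--     >>> list(unordered_pairs([1, 2, 3]))
--     [(1, 2), (1, 3), (2, 3)]
--     """
--     from itertools import tee
--     aa, bb = tee(iterable)
--     try:
--         next(bb)  # advance because we won't pair items with themselves
--         for a in aa:
--             bb, bb_copy = tee(bb)
--             for b in bb:
--                 yield a, b
--             bb = bb_copy
--             next(bb)
--     except StopIteration:
--         return
-- ===== SOURCE B (Python) =====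
-- def unordered_pairs(iterable):
--     """Yield all unordered pairs of items in iterable."""
--     L = list(iterable)
--     for i in range(len(L)):
--         for j in range(i + 1, len(L)):
--             yield L[i], L[j]
-- ===== Notes on version B (the rewrite author's own statement) =====
-- stated objective: simpler
-- what changed: Replaced the tee/advance paired-iterator bookkeeping with a stored list and a double index loop over (i, j) with j > i.
import Mathlib
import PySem

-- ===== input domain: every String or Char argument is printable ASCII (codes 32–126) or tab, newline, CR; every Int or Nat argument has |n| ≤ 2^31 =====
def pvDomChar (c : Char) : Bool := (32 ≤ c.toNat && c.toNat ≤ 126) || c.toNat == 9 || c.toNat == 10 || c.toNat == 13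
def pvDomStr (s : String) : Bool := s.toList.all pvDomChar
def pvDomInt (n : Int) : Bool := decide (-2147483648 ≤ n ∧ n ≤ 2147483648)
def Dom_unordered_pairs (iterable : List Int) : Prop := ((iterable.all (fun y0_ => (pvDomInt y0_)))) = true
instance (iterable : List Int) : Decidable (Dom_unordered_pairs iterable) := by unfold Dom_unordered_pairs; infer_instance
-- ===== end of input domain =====

-- B replaces A's tee/advance iterator bookkeeping with a stored list and a double index loop (simpler); same O(n^2) pair order and contents.
-- ===== PORT A =====
-- inner `for a in aa` loop with the streaming tail iterator bb; after each a, bb is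
-- re-teed and advanced by one; `next(bb)` on an empty bb raises StopIteration -> return []
def unordered_pairs_go (aa bb : List Int) : List (Int × Int) :=
  match aa with
  | [] => []
  | a :: aa' =>
    (bb.map (fun b => (a, b))) ++
      (match bb with
       | [] => []            -- next(bb) raises StopIteration: generator returns
       | _ :: bb' => unordered_pairs_go aa' bb')

def unordered_pairs (iterable : List Int) : List (Int × Int) :=
  -- aa, bb = tee(iterable); next(bb) (StopIteration on empty -> return [])
  match iterable with
  | [] => []
  | _ :: rest => unordered_pairs_go iterable rest

-- ===== PORT B =====
def unordered_pairs_alt (iterable : List Int) : List (Int × Int) :=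
  (List.range iterable.length).flatMap (fun i =>
    (List.range' (i + 1) (iterable.length - (i + 1))).map (fun j =>
      (iterable[i]!, iterable[j]!)))

-- ===== PRECONDITION & SPEC =====
def Spec_unordered_pairs (iterable : List Int) (out : List (Int × Int)) : Prop := out = unordered_pairs_alt iterable
instance (iterable : List Int) (out : List (Int × Int)) : Decidable (Spec_unordered_pairs iterable out) := by unfold Spec_unordered_pairs; infer_instance

-- ===== CLAIM (what is proved, stated in full; the proofs are below) =====
def Claim_equal_unordered_pairs : Prop := ∀ (iterable : List Int), Dom_unordered_pairs iterable → Spec_unordered_pairs iterable (unordered_pairs iterable)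

-- ===== LEMMAS AND PROOFS =====
-- canonical form: pairs of the head with the tail, then pairs of the tail
def pairsSpec : List Int → List (Int × Int)
  | [] => []
  | a :: t => (t.map (fun b => (a, b))) ++ pairsSpec t

theorem map_range_getElem (t : List Int) :
    (List.range t.length).map (fun j => t[j]!) = t := by
  induction t with
  | nil => simp
  | cons a t ih =>
    rw [List.length_cons, List.range_succ_eq_map, List.map_cons, List.map_map,
      show ((fun j => (a :: t)[j]!) ∘ Nat.succ) = (fun j => t[j]!) from
        funext fun j => by simp,
      ih]
    simp

theorem go_eq_pairsSpec (a : Int) (t : List Int) :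
    unordered_pairs_go (a :: t) t = pairsSpec (a :: t) := by
  induction t generalizing a with
  | nil => simp [unordered_pairs_go, pairsSpec]
  | cons b t ih =>
    have h := ih b
    simp only [unordered_pairs_go, pairsSpec] at h ⊢
    rw [h]

theorem alt_cons (a : Int) (t : List Int) :
    unordered_pairs_alt (a :: t) =
      (t.map (fun b => (a, b))) ++ unordered_pairs_alt t := by
  simp only [unordered_pairs_alt, List.length_cons]
  rw [List.range_succ_eq_map, List.flatMap_cons]
  congr 1
  · rw [Nat.add_sub_cancel, List.range'_eq_map_range, List.map_map]
    calc ((List.range t.length).map (fun j => ((a :: t)[0]!, (a :: t)[1 + j]!)))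
        = (List.range t.length).map (fun j => (a, t[j]!)) := by
          apply List.map_congr_left
          intro j _
          rw [Nat.add_comm 1 j]
          simp
      _ = t.map (fun b => (a, b)) := by
          conv_rhs => rw [← map_range_getElem t]
          rw [List.map_map]; rfl
  · rw [List.flatMap_map]
    apply List.flatMap_congr
    intro i _
    have hlen : t.length + 1 - (i + 1 + 1) = t.length - (i + 1) := by omega
    rw [List.range'_eq_map_range, List.range'_eq_map_range, List.map_map, List.map_map, hlen]
    apply List.map_congr_left
    intro m _
    have h2 : i + 1 + 1 + m = (i + 1 + m) + 1 := by omega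
    simp only [Function.comp_apply]
    rw [h2]; simp

theorem alt_eq_pairsSpec (L : List Int) : unordered_pairs_alt L = pairsSpec L := by
  induction L with
  | nil => simp [unordered_pairs_alt, pairsSpec]
  | cons a t ih => rw [alt_cons, pairsSpec, ih]

theorem unordered_pairs_spec : Claim_equal_unordered_pairs := by
  intro L _
  unfold Spec_unordered_pairs
  rw [alt_eq_pairsSpec]
  cases L with
  | nil => simp [unordered_pairs, pairsSpec]
  | cons a t => simp only [unordered_pairs]; exact go_eq_pairsSpec a t
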